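-- pv_equiv track=rewrite | github.com/Babbsrey22/alternative_string_functions | no_lower.py | lowercase_alternative
-- ===== SOURCE A (Python) =====
-- def lowercase_alternative(s):
--     result = " "
--     for char in s:
--         if "A" <= char <= "Z":
--             result += chr(ord(char) + 32)
--         else:
--             result += char
--     return result
-- ===== SOURCE B (Python) =====
-- def lowercase_alternative(s):
--     # Run-based scan: copy maximal uppercase-free segments wholesale via slicing,
--     # lowercase only the uppercase hit between runs, join once at the end.
--     parts = [" "]
--     i = 0
--     n = len(s)
--     while i < n:
--         j = i
--         while j < n and not ("A" <= s[j] <= "Z"):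
--             j += 1
--         parts.append(s[i:j])
--         if j < n:
--             parts.append(chr(ord(s[j]) + 32))
--             j += 1
--         i = j
--     return "".join(parts)
-- ===== Notes on version B (the rewrite author's own statement) =====
-- stated objective: alternative
-- what changed: Replaces the per-character branch-and-concatenate loop with a run-based scan: an inner scan finds each maximal uppercase-free run, which is copied wholesale as one slice, the single uppercase hit after it is lowercased, and the collected parts are joined once at the end.
import Mathlib
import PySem

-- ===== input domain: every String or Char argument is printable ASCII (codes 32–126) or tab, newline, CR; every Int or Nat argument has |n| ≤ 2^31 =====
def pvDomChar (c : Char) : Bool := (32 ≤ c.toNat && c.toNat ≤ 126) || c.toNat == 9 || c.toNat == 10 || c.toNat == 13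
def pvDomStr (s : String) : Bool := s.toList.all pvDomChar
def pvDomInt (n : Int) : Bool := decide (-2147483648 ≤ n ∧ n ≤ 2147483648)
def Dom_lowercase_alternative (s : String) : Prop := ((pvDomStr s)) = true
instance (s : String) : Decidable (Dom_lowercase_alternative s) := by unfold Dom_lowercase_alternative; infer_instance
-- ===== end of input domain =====

-- B replaces A's per-character branch-and-append loop by a run-based scan: each maximal
-- uppercase-free run is copied wholesale as one slice, the uppercase hit after it is
-- lowercased, and the parts are joined once at the end (alternative decomposition).

-- ===== PORT A =====
def lowercase_alternative (s : String) : String :=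
  String.ofList (s.toList.foldl
    (fun acc c => acc ++ [if 'A' ≤ c ∧ c ≤ 'Z' then Char.ofNat (c.toNat + 32) else c])
    [' '])

-- ===== PORT B =====
-- inner while: j = i; while j < n and not ("A" <= s[j] <= "Z"): j += 1
def pvFindJ (l : List Char) (j : Nat) : Nat :=
  if h : j < l.length then
    if 'A' ≤ l[j] && l[j] ≤ 'Z' then j else pvFindJ l (j + 1)
  else j
termination_by l.length - j

theorem le_pvFindJ (l : List Char) (j : Nat) : j ≤ pvFindJ l j := by
  fun_induction pvFindJ with
  | case1 => omega
  | case2 _ _ _ ih => omega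
  | case3 => omega

-- outer while over i, accumulating parts
def pvOuter (l : List Char) (i : Nat) (parts : List (List Char)) : List (List Char) :=
  if i < l.length then
    let j := pvFindJ l i
    let parts1 := parts ++ [PySem.List.slice l (some (i : Int)) (some (j : Int))]
    if h : j < l.length then
      pvOuter l (j + 1) (parts1 ++ [[Char.ofNat (l[j].toNat + 32)]])
    else parts1
  else parts
termination_by l.length - i
decreasing_by
  have := le_pvFindJ l i
  omega

-- parts = [" "]; loop; "".join(parts)
def lowercase_alternative_alt (s : String) : String :=
  String.ofList ((pvOuter s.toList 0 [[' ']]).flatten)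

-- ===== PRECONDITION & SPEC =====
def Spec_lowercase_alternative (s : String) (out : String) : Prop := out = lowercase_alternative_alt s
instance (s : String) (out : String) : Decidable (Spec_lowercase_alternative s out) := by unfold Spec_lowercase_alternative; infer_instance

-- ===== CLAIM =====
def Claim_equal_lowercase_alternative : Prop := ∀ (s : String), Dom_lowercase_alternative s → Spec_lowercase_alternative s (lowercase_alternative s)

-- ===== LEMMAS AND PROOFS =====

-- A's per-character transform
def pvLow (c : Char) : Char := if 'A' ≤ c ∧ c ≤ 'Z' then Char.ofNat (c.toNat + 32) else c

theorem pvFindJ_le_length (l : List Char) (j : Nat) (h : j ≤ l.length) :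
    pvFindJ l j ≤ l.length := by
  fun_induction pvFindJ with
  | case1 => omega
  | case2 j h _ ih => exact ih (by omega)
  | case3 => omega

theorem pvFindJ_not_upper (l : List Char) (j : Nat) :
    ∀ k (_ : k < pvFindJ l j), j ≤ k → ∀ (hkl : k < l.length),
      ¬('A' ≤ l[k] && l[k] ≤ 'Z') = true := by
  fun_induction pvFindJ with
  | case1 j h hu => intro k hk hjk _; omega
  | case2 j h hu ih =>
      intro k hk hjk hkl
      rcases Nat.eq_or_lt_of_le hjk with rfl | hlt
      · simpa using hu
      · exact ih k hk hlt hkl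
  | case3 j h => intro k hk hjk hkl; omega

theorem pvFindJ_upper (l : List Char) (j : Nat) (h : pvFindJ l j < l.length) :
    ('A' ≤ l[pvFindJ l j] && l[pvFindJ l j] ≤ 'Z') = true := by
  fun_induction pvFindJ with
  | case1 j hj hu => simpa using hu
  | case2 j hj hu ih => exact ih h
  | case3 j hj => omega

theorem pvLow_eq_of_not_upper (c : Char) (h : ¬('A' ≤ c && c ≤ 'Z') = true) :
    pvLow c = c := by
  simp only [Bool.and_eq_true, decide_eq_true_eq, not_and_or] at h
  unfold pvLow
  rcases h with h | h <;> simp [h]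

theorem pvOuter_flatten (l : List Char) :
    ∀ (n i : Nat) (parts : List (List Char)), l.length - i ≤ n →
      (pvOuter l i parts).flatten = parts.flatten ++ (l.drop i).map pvLow := by
  intro n
  induction n with
  | zero =>
      intro i parts h
      have hi : l.length ≤ i := by omega
      rw [pvOuter]
      simp [Nat.not_lt.mpr hi, List.drop_eq_nil_of_le hi]
  | succ n ih =>
      intro i parts h
      rw [pvOuter]
      by_cases hi : i < l.length
      · simp only [hi, if_true]
        set j := pvFindJ l i with hj
        have hij : i ≤ j := le_pvFindJ l i
        have hjlen : j ≤ l.length := pvFindJ_le_length l i (by omega)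
        have hslice : PySem.List.slice l (some (i : Int)) (some (j : Int))
            = (l.drop i).take (j - i) := PySem.List.slice_natCast l i j
        have hmapseg : ((l.drop i).take (j - i)).map pvLow = (l.drop i).take (j - i) := by
          have hcong : ((l.drop i).take (j - i)).map pvLow = ((l.drop i).take (j - i)).map id := by
            apply List.map_congr_left
            intro c hc
            obtain ⟨k, hk, hck⟩ := List.getElem_of_mem hc
            have hktake : k < j - i := by
              have := hk.trans_le (List.length_take_le ..)
              omega
            have hklen : i + k < l.length := by omega
            have hkd : k < (l.drop i).length := by
              rw [List.length_drop]; omega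
            have hcl : c = l[i + k] := by
              rw [← hck, List.getElem_take, List.getElem_drop]
            have hnu := pvFindJ_not_upper l i (i + k) (by omega) (by omega) hklen
            rw [hcl]
            exact pvLow_eq_of_not_upper _ hnu
          rw [hcong, List.map_id]
        have hdrop_split : l.drop i = (l.drop i).take (j - i) ++ l.drop j := by
          conv_lhs => rw [← List.take_append_drop (j - i) (l.drop i)]
          rw [List.drop_drop, Nat.add_sub_cancel' hij]
        by_cases hjl : j < l.length
        · simp only [hjl, dif_pos]
          rw [ih (j + 1) _ (by omega)]
          have hdropj : l.drop j = l[j] :: l.drop (j + 1) :=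
            List.drop_eq_getElem_cons hjl
          have hup := pvFindJ_upper l i hjl
          simp only [Bool.and_eq_true, decide_eq_true_eq] at hup
          have hlowj : pvLow l[j] = Char.ofNat (l[j].toNat + 32) := by
            unfold pvLow
            rw [if_pos]
            exact ⟨hup.1, hup.2⟩
          rw [hslice]
          conv_rhs => rw [hdrop_split, hdropj]
          rw [List.map_append, List.map_cons, hmapseg, hlowj]
          simp [List.append_assoc]
        · simp only [hjl, dif_neg, not_false_iff]
          have hjeq : j = l.length := by omega
          have : l.drop j = [] := List.drop_eq_nil_of_le (by omega)
          rw [hslice]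
          conv_rhs => rw [hdrop_split, this]
          rw [List.map_append, hmapseg]
          simp
      · simp only [hi, if_false]
        have : l.length ≤ i := by omega
        simp [List.drop_eq_nil_of_le this]

-- ===== VERDICT =====
theorem lowercase_alternative_spec : Claim_equal_lowercase_alternative := by
  intro s _
  unfold Spec_lowercase_alternative lowercase_alternative lowercase_alternative_alt
  rw [PySem.List.foldl_append_singleton_eq_map,
    pvOuter_flatten s.toList (s.toList.length) 0 _ (by omega)]
  rfl
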